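-- pv_equiv track=rewrite | github.com/LeticiaKang/Data_Analytics_Course | 조합.py | YesDuple
-- ===== SOURCE A (Python) =====
-- def YesDuple(sample):
--
--     all = [] #묶음 집합
--
--     num = 0
--     to_list = ""
--     while True:
--         for a in sample[num: ]:
--             to_list = to_list + a
--             all.append(list(to_list))
--             num += 1
--
--         if len(sample) == num:
--             break
--
--     return all
-- ===== SOURCE B (Python) =====
-- def YesDuple(sample):
--     return [list(sample[:i]) for i in range(1, len(sample) + 1)]
-- ===== Notes on version B (the rewrite author's own statement) =====
-- stated objective: simpler
-- what changed: Replaces the while/for char-accumulator (growing to_list and a num cursor) with a single comprehension that recomputes each prefix independently by slicing sample[:i] for i in 1..len(sample).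
import Mathlib
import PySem

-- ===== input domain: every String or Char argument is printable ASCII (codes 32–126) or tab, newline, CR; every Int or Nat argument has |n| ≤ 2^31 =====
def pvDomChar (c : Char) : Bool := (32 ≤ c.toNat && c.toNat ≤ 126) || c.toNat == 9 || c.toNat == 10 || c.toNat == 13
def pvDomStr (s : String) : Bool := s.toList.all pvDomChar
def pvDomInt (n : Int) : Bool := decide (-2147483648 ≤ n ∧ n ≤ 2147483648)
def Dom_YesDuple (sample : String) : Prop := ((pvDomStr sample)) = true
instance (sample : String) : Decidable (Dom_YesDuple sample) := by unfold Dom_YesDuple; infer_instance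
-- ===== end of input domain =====

-- B replaces A's while/char-accumulator loop with independent prefix slices sample[:i] over range(1, len+1): simpler, same cost.


-- ===== PORT A =====
-- step of the inner 'for a in sample[num:]' loop; state = (all, to_list, num)
def YesDupleStep (st : List (List String) × List Char × Int) (a : Char) :
    List (List String) × List Char × Int :=
  let tl := st.2.1 ++ [a]                                   -- to_list = to_list + a
  (st.1 ++ [tl.map (fun c => String.singleton c)], tl, st.2.2 + 1)  -- all.append(list(to_list)); num += 1

-- the 'while True:' loop; fuel only makes the recursion total (never exhausted on real runs)
def YesDupleWhile (cs : List Char) (all : List (List String)) (toList : List Char)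
    (num : Int) : Nat → List (List String)
  | 0 => all
  | fuel + 1 =>
    let st := (PySem.List.slice cs (some num) none).foldl YesDupleStep (all, toList, num)
    if (cs.length : Int) == st.2.2 then st.1
    else YesDupleWhile cs st.1 st.2.1 st.2.2 fuel

def YesDuple (sample : String) : List (List String) :=
  YesDupleWhile sample.toList [] [] 0 (sample.toList.length + 1)

-- ===== PORT B =====
def YesDuple_alt (sample : String) : List (List String) :=
  (PySem.List.pyRange 1 ((sample.toList.length : Int) + 1) 1).map
    (fun i => (PySem.List.slice sample.toList none (some i)).map (fun c => String.singleton c))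

-- ===== PRECONDITION & SPEC =====
def Spec_YesDuple (sample : String) (out : List (List String)) : Prop := out = YesDuple_alt sample
instance (sample : String) (out : List (List String)) : Decidable (Spec_YesDuple sample out) := by unfold Spec_YesDuple; infer_instance

-- ===== CLAIM (what is proved, stated in full; the proofs are below) =====
def Claim_equal_YesDuple : Prop := ∀ (sample : String), Dom_YesDuple sample → Spec_YesDuple sample (YesDuple sample)

-- ===== LEMMAS AND PROOFS =====

-- ===== VERDICT (by name: the statement is the Claim_ definition above) =====
-- fold invariant for the inner for-loop of A
theorem YesDupleStep_fold (l : List Char) : ∀ (all : List (List String)) (tl : List Char) (num : Int),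
    l.foldl YesDupleStep (all, tl, num) =
      (all ++ (List.range l.length).map (fun k => (tl ++ l.take (k + 1)).map (fun c => String.singleton c)),
       tl ++ l, num + l.length) := by
  induction l with
  | nil => intro all tl num; simp
  | cons x xs ih =>
    intro all tl num
    simp only [List.foldl_cons, YesDupleStep, ih, List.length_cons, List.range_succ_eq_map,
      List.map_cons, List.map_map]
    refine Prod.ext ?_ (Prod.ext ?_ ?_)
    · simp [List.append_assoc, Function.comp]
    · simp
    · push_cast; ring

theorem YesDuple_spec : Claim_equal_YesDuple := by
  intro sample _
  unfold Spec_YesDuple YesDuple YesDuple_alt YesDupleWhile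
  set cs := sample.toList with hcs
  simp only [PySem.List.slice_zero_start, PySem.List.slice_none_none,
    YesDupleStep_fold cs [] [] 0, zero_add, beq_self_eq_true, if_true, List.nil_append]
  rw [PySem.List.pyRange_one, List.map_map]
  have hlen : ((cs.length : Int) + 1 - 1).toNat = cs.length := by omega
  rw [hlen]
  apply List.map_congr_left
  intro k hk
  simp only [Function.comp]
  rw [PySem.List.slice_to (xs := cs) (b := 1 + (k : Int)) (by positivity),
    show ((1 : Int) + (k : Int)).toNat = k + 1 by omega]
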